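-- pv_equiv track=rewrite | github.com/kulraghav/CodePractice | practice.py | max_valid
-- ===== SOURCE A (Python) =====
-- def max_valid(s):
--     stack = []
--     for i in range(len(s)):
--         if s[i] == "(":
--             stack.append(s[i])
--
--         if s[i] == ")":
--             if is_annihilating(")", stack):
--                 stack.pop(-1)
--             else:
--                 stack.append(s[i])
--
--     return len(s) - len(stack)
--
-- partners = {"(": ")", "{": "}", "[": "]"}
--
-- def is_open(c):
--     if c == "(" or c == "{" or c == "[":
--         return True
--     else:
--         return False
--
-- def is_annihilating(char, stack):
--     if not stack:
--         return False
--
--     if is_open(char):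
--         return False
--
--     top = stack[-1]
--
--     if not is_open(top):
--         return False
--
--     if partners[top] == char:
--         return True
--     else:
--         return False
-- ===== SOURCE B (Python) =====
-- def max_valid(s):
--     t = "".join(c for c in s if c in "()")
--     while "()" in t:
--         t = t.replace("()", "")
--     return len(s) - len(t)
-- ===== Notes on version B (the rewrite author's own statement) =====
-- stated objective: alternative
-- what changed: Replaced the single-pass character-stack simulation (with is_open/is_annihilating/partners helpers) by string rewriting: filter the string to its parentheses and repeatedly delete every adjacent open-close pair via str.replace until a normal form remains; the answer is len(s) minus the normal form's length.
import Mathlib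
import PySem

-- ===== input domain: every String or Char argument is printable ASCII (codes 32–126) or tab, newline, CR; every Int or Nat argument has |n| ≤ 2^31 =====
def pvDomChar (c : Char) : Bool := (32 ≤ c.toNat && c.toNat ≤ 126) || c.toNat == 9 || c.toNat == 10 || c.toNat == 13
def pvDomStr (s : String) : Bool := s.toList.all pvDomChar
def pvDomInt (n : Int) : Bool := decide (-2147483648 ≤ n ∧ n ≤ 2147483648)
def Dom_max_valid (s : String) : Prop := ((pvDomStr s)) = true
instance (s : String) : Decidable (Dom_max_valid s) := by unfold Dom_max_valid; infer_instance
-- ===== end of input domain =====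

-- B replaces A's one-pass character-stack simulation by string rewriting: keep only the
-- parentheses, repeatedly delete every "()" substring until none remains, and return
-- len(s) minus the normal form's length; objective: a genuinely different algorithm.

-- ===== PORT A =====
-- module-level dict 'partners'
def pvPartners : PySem.Dict Char Char :=
  PySem.Dict.ofList [('(', ')'), ('{', '}'), ('[', ']')]

def pvIsOpen (c : Char) : Bool :=
  if c = '(' ∨ c = '{' ∨ c = '[' then true else false

-- stack is stored top-first ('append' pushes at the head, 'stack[-1]' is the head, 'pop(-1)' drops it)
def pvIsAnnihilating (char : Char) (stack : List Char) : Bool :=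
  match stack with
  | [] => false            -- 'if not stack: return False'
  | top :: _ =>
    if pvIsOpen char then false
    else if ¬ pvIsOpen top then false
    -- 'partners[top]': top is open here, so the key is always present (no KeyError)
    else match pvPartners.get? top with
         | some p => p == char
         | none => false

def pvAStep (stack : List Char) (c : Char) : List Char :=
  let stack := if c = '(' then c :: stack else stack
  if c = ')' then
    if pvIsAnnihilating ')' stack then stack.tail else c :: stack
  else stack

def max_valid (s : String) : Int :=
  (s.toList.length : Int) - ((s.toList.foldl pvAStep []).length : Int)

-- ===== PORT B =====
-- hand port of t.replace("()", ""): Python's left-to-right non-overlapping replacement,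
-- exact for this fixed two-character pattern
def pvRemovePairs : List Char → List Char
  | [] => []
  | [c] => [c]
  | a :: b :: r => if a = '(' ∧ b = ')' then pvRemovePairs r else a :: pvRemovePairs (b :: r)

theorem pvRemovePairs_length_le (l : List Char) : (pvRemovePairs l).length ≤ l.length := by
  fun_induction pvRemovePairs l with
  | case1 => exact le_rfl
  | case2 c => exact le_rfl
  | case3 a b r h ih => simp only [List.length_cons]; omega
  | case4 a b r h ih => simp only [List.length_cons] at ih ⊢; omega

theorem pvRemovePairs_length_lt (l : List Char) (h : PySem.Chars.isIn ['(', ')'] l = true) :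
    (pvRemovePairs l).length < l.length := by
  rw [PySem.Chars.isIn_iff_infix] at h
  revert h
  fun_induction pvRemovePairs l with
  | case1 => intro h; exact absurd h (by simp)
  | case2 c =>
    intro h
    rcases h with ⟨u, v, huv⟩
    have := congrArg List.length huv
    simp [List.length_append] at this
    omega
  | case3 a b r hab ih =>
    intro _
    simp only [List.length_cons]
    have := pvRemovePairs_length_le r; omega
  | case4 a b r hab ih =>
    intro h
    have h' : ['(', ')'] <:+: b :: r := by
      rcases h with ⟨u, v, huv⟩
      cases u with
      | nil => simp at huv; exact absurd ⟨huv.1.symm, huv.2.1.symm⟩ hab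
      | cons x u' =>
        simp only [List.cons_append, List.cons.injEq] at huv
        exact ⟨u', v, huv.2⟩
    simp only [List.length_cons]
    exact Nat.succ_lt_succ (ih h')

-- the 'while "()" in t:' loop of B
def pvLoop (l : List Char) : List Char :=
  if h : PySem.Chars.isIn ['(', ')'] l = true then pvLoop (pvRemovePairs l) else l
termination_by l.length
decreasing_by exact pvRemovePairs_length_lt l h

def max_valid_alt (s : String) : Int :=
  let t := s.toList.filter (fun c => c = '(' || c = ')')
  (s.toList.length : Int) - ((pvLoop t).length : Int)

-- ===== PRECONDITION & SPEC =====
def Spec_max_valid (s : String) (out : Int) : Prop := out = max_valid_alt s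
instance (s : String) (out : Int) : Decidable (Spec_max_valid s out) := by unfold Spec_max_valid; infer_instance

-- ===== CLAIM (what is proved, stated in full; the proofs are below) =====
def Claim_equal_max_valid : Prop := ∀ (s : String), Dom_max_valid s → Spec_max_valid s (max_valid s)

-- ===== LEMMAS AND PROOFS =====

-- A's step ignores every non-parenthesis character
theorem pvAStep_skip (st : List Char) (c : Char) (h : (c = '(' || c = ')') = false) :
    pvAStep st c = st := by
  simp only [Bool.or_eq_false_iff, decide_eq_false_iff_not] at h
  simp [pvAStep, h.1, h.2]

theorem pvFold_filter (l : List Char) : ∀ st,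
    l.foldl pvAStep st = (l.filter (fun c => c = '(' || c = ')')).foldl pvAStep st := by
  induction l with
  | nil => intro st; rfl
  | cons a t ih =>
    intro st
    by_cases h : (a = '(' || a = ')') = true
    · simp [List.filter_cons, h, List.foldl_cons, ih]
    · simp only [Bool.not_eq_true] at h
      simp [List.filter_cons, h, List.foldl_cons, pvAStep_skip st a h, ih]

-- deleting a leading "()" is invisible to A's stack
theorem pvAStep_pair (st : List Char) : pvAStep (pvAStep st '(') ')' = st := by
  have hget : pvPartners.get? '(' = some ')' := rfl
  simp [pvAStep, pvIsAnnihilating, pvIsOpen, hget]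

-- one replace pass is invisible to A's stack
theorem pvFold_removePairs (l : List Char) : ∀ st,
    (pvRemovePairs l).foldl pvAStep st = l.foldl pvAStep st := by
  fun_induction pvRemovePairs l with
  | case1 => intro st; rfl
  | case2 c => intro st; rfl
  | case3 a b r h ih =>
    intro st
    simp only [List.foldl_cons]
    rw [ih st, h.1, h.2, pvAStep_pair]
  | case4 a b r h ih =>
    intro st
    simp only [List.foldl_cons]
    exact ih (pvAStep st a)

theorem pvRemovePairs_mem (l : List Char) : ∀ x, x ∈ pvRemovePairs l → x ∈ l := by
  fun_induction pvRemovePairs l with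
  | case1 => intro x hx; exact hx
  | case2 c => intro x hx; exact hx
  | case3 a b r h ih =>
    intro x hx
    exact List.mem_cons_of_mem a (List.mem_cons_of_mem b (ih x hx))
  | case4 a b r h ih =>
    intro x hx
    rcases List.mem_cons.mp hx with hx | hx
    · exact hx ▸ List.mem_cons_self
    · exact List.mem_cons_of_mem a (ih x hx)

-- a paren-only string with no "()" substring is ")"*a ++ "("*b
theorem pvNormalForm (l : List Char) (hp : ∀ x ∈ l, x = '(' ∨ x = ')')
    (h : ¬ (['(', ')'] <:+: l)) :
    ∃ a b, l = List.replicate a ')' ++ List.replicate b '(' := by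
  induction l with
  | nil => exact ⟨0, 0, rfl⟩
  | cons x t ih =>
    have ht : ¬ (['(', ')'] <:+: t) := fun hi => h (hi.trans (List.suffix_cons x t).isInfix)
    obtain ⟨a, b, rfl⟩ := ih (fun y hy => hp y (List.mem_cons_of_mem x hy)) ht
    rcases hp x List.mem_cons_self with hx | hx
    · subst hx
      have ha : a = 0 := by
        by_contra ha0
        obtain ⟨a', rfl⟩ := Nat.exists_eq_succ_of_ne_zero ha0
        exact h ⟨[], List.replicate a' ')' ++ List.replicate b '(',
          by simp [List.replicate_succ]⟩
      subst ha
      exact ⟨0, b + 1, by simp [List.replicate_succ]⟩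
    · subst hx
      exact ⟨a + 1, b, by simp [List.replicate_succ]⟩

-- A's stack over ")"*a from a stack of closes just pushes
theorem pvStack_closes (a : Nat) : ∀ c : Nat,
    (List.replicate a ')').foldl pvAStep (List.replicate c ')') = List.replicate (a + c) ')' := by
  induction a with
  | zero => intro c; simp
  | succ a' ih =>
    intro c
    have hstep : pvAStep (List.replicate c ')') ')' = List.replicate (c + 1) ')' := by
      cases c <;> simp [pvAStep, pvIsAnnihilating, pvIsOpen, List.replicate_succ]
    rw [List.replicate_succ, List.foldl_cons, hstep, ih (c + 1)]
    congr 1; omega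
  -- (stack of closes: ')' is never annihilating, so every ')' is pushed)

-- A's stack over "("*b just pushes opens
theorem pvStack_opens (b : Nat) : ∀ o c : Nat,
    (List.replicate b '(').foldl pvAStep
      (List.replicate o '(' ++ List.replicate c ')') =
    List.replicate (b + o) '(' ++ List.replicate c ')' := by
  induction b with
  | zero => intro o c; simp
  | succ b' ih =>
    intro o c
    have hstep : pvAStep (List.replicate o '(' ++ List.replicate c ')') '(' =
        List.replicate (o + 1) '(' ++ List.replicate c ')' := by
      simp [pvAStep, List.replicate_succ]
    rw [List.replicate_succ, List.foldl_cons, hstep, ih (o + 1) c]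
    have hn : b' + (o + 1) = b' + 1 + o := by omega
    rw [hn]

-- on a normal form, A's stack has the full length
theorem pvStack_normal (a b : Nat) :
    ((List.replicate a ')' ++ List.replicate b '(').foldl pvAStep []).length = a + b := by
  rw [List.foldl_append]
  have h1 : (List.replicate a ')').foldl pvAStep ([] : List Char) = List.replicate a ')' := by
    have := pvStack_closes a 0; simpa using this
  rw [h1]
  have h2 := pvStack_opens b 0 a
  simp only [List.replicate_zero, List.nil_append] at h2
  rw [h2]
  simp only [List.length_append, List.length_replicate]
  omega

-- main invariant: on paren-only input, B's rewriting normal form has A's stack length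
theorem pvMain : ∀ (n : Nat) (l : List Char), l.length ≤ n →
    (∀ x ∈ l, x = '(' ∨ x = ')') →
    (l.foldl pvAStep []).length = (pvLoop l).length := by
  intro n
  induction n with
  | zero =>
    intro l hlen _
    have h0 : l = [] := List.eq_nil_of_length_eq_zero (Nat.le_zero.mp hlen)
    subst h0
    have hnil : PySem.Chars.isIn ['(', ')'] ([] : List Char) = false := rfl
    rw [pvLoop, hnil]; simp
  | succ n ih =>
    intro l hlen hp
    rw [pvLoop]
    by_cases h : PySem.Chars.isIn ['(', ')'] l = true
    · rw [dif_pos h, ← pvFold_removePairs l []]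
      exact ih (pvRemovePairs l)
        (by have := pvRemovePairs_length_lt l h; omega)
        (fun x hx => hp x (pvRemovePairs_mem l x hx))
    · rw [dif_neg h]
      have h' : ¬ (['(', ')'] <:+: l) := by
        intro hi
        exact h ((PySem.Chars.isIn_iff_infix _ _).mpr hi)
      obtain ⟨a, b, rfl⟩ := pvNormalForm l hp h'
      rw [pvStack_normal]; simp

-- ===== VERDICT (by name: the statement is the Claim_ definition above) =====
theorem max_valid_spec : Claim_equal_max_valid := by
  intro s _
  unfold Spec_max_valid max_valid max_valid_alt
  have hfil := pvFold_filter s.toList []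
  have hm := pvMain (s.toList.filter (fun c => c = '(' || c = ')')).length
      (s.toList.filter (fun c => c = '(' || c = ')')) le_rfl
      (by intro x hx; simpa using (List.of_mem_filter hx))
  rw [hfil, hm]
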